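-- pv_equiv track=rewrite | github.com/XChen-Zero/OneEval | scripts/build_site_data.py | protocol_param_values_from_lines
-- ===== SOURCE A (Python) =====
-- def protocol_param_values_from_lines(lines: list[dict[str, str]]) -> dict[str, str]:
--     values = {"temperature": "—", "top_p": "—", "top_k": "—"}
--     for line in lines:
--         label = line["label"]
--         if label == "Temperature":
--             values["temperature"] = line["value"]
--         elif label == "Top-p":
--             values["top_p"] = line["value"]
--         elif label == "Top-k":
--             values["top_k"] = line["value"]
--     return values
-- ===== SOURCE B (Python) =====
-- def protocol_param_values_from_lines(lines: list[dict[str, str]]) -> dict[str, str]: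
--     def last_value(label):
--         for line in reversed(lines):
--             if line["label"] == label:
--                 return line["value"]
--         return "—"
--     return {"temperature": last_value("Temperature"),
--             "top_p": last_value("Top-p"),
--             "top_k": last_value("Top-k")}
-- ===== Notes on version B (the rewrite author's own statement) =====
-- stated objective: alternative
-- what changed: Replaces A's single forward pass with a mutating accumulator dict by three independent backward scans, each returning the value of the first match from the end (= A's last-write-wins) with early return.
import Mathlib
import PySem

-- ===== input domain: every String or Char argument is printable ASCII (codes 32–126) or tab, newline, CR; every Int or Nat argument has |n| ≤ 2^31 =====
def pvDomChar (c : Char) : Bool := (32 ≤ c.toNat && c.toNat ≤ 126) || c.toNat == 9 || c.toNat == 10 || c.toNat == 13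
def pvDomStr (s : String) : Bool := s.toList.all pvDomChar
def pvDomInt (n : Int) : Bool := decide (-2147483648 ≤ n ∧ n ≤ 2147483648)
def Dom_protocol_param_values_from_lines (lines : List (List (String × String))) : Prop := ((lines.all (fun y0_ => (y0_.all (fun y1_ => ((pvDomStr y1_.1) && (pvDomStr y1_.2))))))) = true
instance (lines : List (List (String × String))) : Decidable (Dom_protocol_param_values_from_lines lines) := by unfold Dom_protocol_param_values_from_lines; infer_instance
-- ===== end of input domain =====

-- B replaces A's forward accumulator pass by three independent backward scans (first match from the end); objective: alternative.

-- line["label"] / line["value"] on an input dict (assoc list); Python raises KeyError where get? is none —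
-- those inputs are outside Pre_; there the ports fall back to "" (never equal to a wanted label).
def pvLineGet (line : List (String × String)) (k : String) : Option String :=
  (PySem.Dict.mk line).get? k

-- ===== PORT A =====
def protocol_param_values_from_lines (lines : List (List (String × String))) : List (String × String) :=
  let init : PySem.Dict String String :=
    PySem.Dict.mk [("temperature", "—"), ("top_p", "—"), ("top_k", "—")]
  (lines.foldl (fun values line =>
    let label := (pvLineGet line "label").getD ""
    if label = "Temperature" then values.insert "temperature" ((pvLineGet line "value").getD "")
    else if label = "Top-p" then values.insert "top_p" ((pvLineGet line "value").getD "")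
    else if label = "Top-k" then values.insert "top_k" ((pvLineGet line "value").getD "")
    else values) init).items

-- ===== PORT B =====
-- Source B's inner loop: scan a (already reversed) list, return the first matching value, else "—"
def pvLastValueLoop (lines : List (List (String × String))) (label : String) : String :=
  match lines with
  | [] => "—"
  | line :: rest =>
      if (pvLineGet line "label").getD "" = label then (pvLineGet line "value").getD ""
      else pvLastValueLoop rest label

def protocol_param_values_from_lines_alt (lines : List (List (String × String))) : List (String × String) :=
  let last_value := fun (label : String) => pvLastValueLoop lines.reverse label
  [("temperature", last_value "Temperature"),
   ("top_p", last_value "Top-p"),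
   ("top_k", last_value "Top-k")]

-- ===== PRECONDITION & SPEC =====
-- Pre_ excludes exactly the inputs where the Python raises KeyError: a line without a "label" key,
-- or a line whose label is one of the three wanted ones but which has no "value" key.
def Pre_protocol_param_values_from_lines (lines : List (List (String × String))) : Prop :=
  ∀ line ∈ lines, (pvLineGet line "label").isSome = true ∧
    ((pvLineGet line "label").getD "" ∈ (["Temperature", "Top-p", "Top-k"] : List String) →
      (pvLineGet line "value").isSome = true)
instance (lines : List (List (String × String))) : Decidable (Pre_protocol_param_values_from_lines lines) := by
  unfold Pre_protocol_param_values_from_lines; infer_instance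

def pvWitness_protocol_param_values_from_lines : (List (List (String × String))) :=
  [[("label", "Temperature"), ("value", "0.7")], [("label", "Model")], [("label", "Top-k"), ("value", "40")]]

def Spec_protocol_param_values_from_lines (lines : List (List (String × String))) (out : List (String × String)) : Prop := out = protocol_param_values_from_lines_alt lines
instance (lines : List (List (String × String))) (out : List (String × String)) : Decidable (Spec_protocol_param_values_from_lines lines out) := by unfold Spec_protocol_param_values_from_lines; infer_instance

-- ===== CLAIM (what is proved, stated in full; the proofs are below) =====
def Claim_equal_protocol_param_values_from_lines : Prop := ∀ (lines : List (List (String × String))), Dom_protocol_param_values_from_lines lines → Pre_protocol_param_values_from_lines lines → Spec_protocol_param_values_from_lines lines (protocol_param_values_from_lines lines)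

-- ===== LEMMAS AND PROOFS =====

-- Dict.insert on the three-key literal dict overwrites in place
theorem pvInsT (x y z v : String) :
    (PySem.Dict.mk [("temperature", x), ("top_p", y), ("top_k", z)]).insert "temperature" v
    = PySem.Dict.mk [("temperature", v), ("top_p", y), ("top_k", z)] := by
  simp [PySem.Dict.insert, PySem.Dict.contains]
theorem pvInsP (x y z v : String) :
    (PySem.Dict.mk [("temperature", x), ("top_p", y), ("top_k", z)]).insert "top_p" v
    = PySem.Dict.mk [("temperature", x), ("top_p", v), ("top_k", z)] := by
  simp [PySem.Dict.insert, PySem.Dict.contains]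
theorem pvInsK (x y z v : String) :
    (PySem.Dict.mk [("temperature", x), ("top_p", y), ("top_k", z)]).insert "top_k" v
    = PySem.Dict.mk [("temperature", x), ("top_p", y), ("top_k", v)] := by
  simp [PySem.Dict.insert, PySem.Dict.contains]

-- pvLastValueLoop with a parametric default, for the append/reverse induction
def pvSearchAcc (lines : List (List (String × String))) (L acc : String) : String :=
  match lines with
  | [] => acc
  | line :: rest =>
      if (pvLineGet line "label").getD "" = L then (pvLineGet line "value").getD ""
      else pvSearchAcc rest L acc

theorem pvSearchAcc_append (xs ys : List (List (String × String))) (L acc : String) :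
    pvSearchAcc (xs ++ ys) L acc = pvSearchAcc xs L (pvSearchAcc ys L acc) := by
  induction xs with
  | nil => rfl
  | cons x xs ih => simp [pvSearchAcc, ih]

theorem pvLoop_eq_search (xs : List (List (String × String))) (L : String) :
    pvLastValueLoop xs L = pvSearchAcc xs L "—" := by
  induction xs with
  | nil => rfl
  | cons x xs ih => simp [pvLastValueLoop, pvSearchAcc, ih]

-- the value of the last line whose label is L, with accumulator/default acc (A's loop invariant)
def pvLastVal (lines : List (List (String × String))) (L : String) (acc : String) : String :=
  match lines with
  | [] => acc
  | line :: rest =>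
      pvLastVal rest L (if (pvLineGet line "label").getD "" = L then (pvLineGet line "value").getD "" else acc)

theorem pvAfold (lines : List (List (String × String))) :
    ∀ x y z : String,
      lines.foldl (fun values line =>
        let label := (pvLineGet line "label").getD ""
        if label = "Temperature" then values.insert "temperature" ((pvLineGet line "value").getD "")
        else if label = "Top-p" then values.insert "top_p" ((pvLineGet line "value").getD "")
        else if label = "Top-k" then values.insert "top_k" ((pvLineGet line "value").getD "")
        else values) (PySem.Dict.mk [("temperature", x), ("top_p", y), ("top_k", z)])
      = PySem.Dict.mk [("temperature", pvLastVal lines "Temperature" x),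
                       ("top_p", pvLastVal lines "Top-p" y),
                       ("top_k", pvLastVal lines "Top-k" z)] := by
  induction lines with
  | nil => intro x y z; rfl
  | cons line rest ih =>
      intro x y z
      simp only [List.foldl_cons, pvLastVal]
      by_cases h1 : (pvLineGet line "label").getD "" = "Temperature"
      · simp [h1, pvInsT, ih]
      · by_cases h2 : (pvLineGet line "label").getD "" = "Top-p"
        · simp [h2, pvInsP, ih]
        · by_cases h3 : (pvLineGet line "label").getD "" = "Top-k"
          · simp [h3, pvInsK, ih]
          · simp [h1, h2, h3, ih]

-- A's forward accumulator equals the backward first-match search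
theorem pvLastVal_eq_search (lines : List (List (String × String))) (L : String) :
    ∀ acc, pvLastVal lines L acc = pvSearchAcc lines.reverse L acc := by
  induction lines with
  | nil => intro acc; rfl
  | cons line rest ih =>
      intro acc
      simp only [pvLastVal, List.reverse_cons, pvSearchAcc_append, ih]
      by_cases h : (pvLineGet line "label").getD "" = L <;> simp [pvSearchAcc, h]

-- ===== VERDICT (by name: the statement is the Claim_ definition above) =====
theorem protocol_param_values_from_lines_spec : Claim_equal_protocol_param_values_from_lines := by
  intro lines _ _
  show protocol_param_values_from_lines lines = protocol_param_values_from_lines_alt lines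
  simp only [protocol_param_values_from_lines, protocol_param_values_from_lines_alt, pvAfold,
    pvLoop_eq_search, pvLastVal_eq_search]
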